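-- pv_equiv track=rewrite | github.com/ArthurJraghatspanyan/AI | Homeworks/11_31_MAR_05_APR/1_tasks_for_if_elif/hw3.py | categorize
-- ===== SOURCE A (Python) =====
-- import typing
--
-- def categorize(iterable, category):
--   if not isinstance(iterable, typing.Iterable):
--     raise TypeError("Type must be iterable.")
--   if category == "Even":
--     return [i for i in iterable if i % 2 == 0]
--   elif category == "Odd":
--     return [i for i in iterable if i % 2 != 0]
--   elif category == "Prime":
--     return [i for i in range(2, 101) if all(i % j for j in range(2, int(i ** 0.5) + 1))]
--   else:
--     raise ValueError("This type of category doesn't exist.")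
-- ===== SOURCE B (Python) =====
-- import typing
--
-- def categorize(iterable, category):
--     if not isinstance(iterable, typing.Iterable):
--         raise TypeError("Type must be iterable.")
--     if category == "Even":
--         return [i for i in iterable if i % 2 == 0]
--     if category == "Odd":
--         return [i for i in iterable if i % 2 != 0]
--     if category == "Prime":
--         # Sieve of Eratosthenes over 0..100 instead of per-candidate trial division
--         is_prime = [True] * 101
--         is_prime[0] = is_prime[1] = False
--         for p in range(2, 11):
--             if is_prime[p]:
--                 for m in range(p * p, 101, p):
--                     is_prime[m] = False
--         return [i for i in range(2, 101) if is_prime[i]]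
--     raise ValueError("This type of category doesn't exist.")
-- ===== Notes on version B (the rewrite author's own statement) =====
-- stated objective: alternative
-- what changed: The Prime branch is rewritten as an array-based Sieve of Eratosthenes (cross out multiples in a boolean table, then read it off) instead of per-candidate trial division with all(); the Even/Odd filters are kept.
import Mathlib
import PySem

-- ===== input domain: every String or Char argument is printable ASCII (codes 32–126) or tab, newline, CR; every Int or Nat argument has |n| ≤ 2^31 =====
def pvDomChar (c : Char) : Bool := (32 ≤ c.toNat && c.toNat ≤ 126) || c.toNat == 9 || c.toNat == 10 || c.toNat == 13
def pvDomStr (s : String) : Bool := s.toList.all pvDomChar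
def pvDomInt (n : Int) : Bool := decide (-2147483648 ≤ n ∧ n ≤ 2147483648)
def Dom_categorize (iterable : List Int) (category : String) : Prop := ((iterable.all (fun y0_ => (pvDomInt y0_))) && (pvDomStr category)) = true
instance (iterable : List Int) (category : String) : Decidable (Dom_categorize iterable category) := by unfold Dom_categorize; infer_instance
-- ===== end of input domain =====

-- B replaces A's trial-division Prime branch with an array-based Sieve of Eratosthenes
-- (identical ascending result); Even/Odd filters and the raising corners are unchanged.
-- ===== PORT A =====
-- int(i ** 0.5), hand-ported as floor-sqrt: exact for the integers 2..100 reached here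
-- (float sqrt is exact on this range); computed as (largest k ≤ 10 with k*k ≤ i)
def pyIsqrt (i : Int) : Int :=
  Int.ofNat ((PySem.List.pyRange 0 11 1).filter (fun k => k * k ≤ i)).length - 1

def categorize (iterable : List Int) (category : String) : List Int :=
  if category = "Even" then
    iterable.filter (fun i => PySem.Int.mod i 2 == 0)
  else if category = "Odd" then
    iterable.filter (fun i => PySem.Int.mod i 2 != 0)
  else if category = "Prime" then
    (PySem.List.pyRange 2 101 1).filter (fun i =>
      (PySem.List.pyRange 2 (pyIsqrt i + 1) 1).all (fun j => PySem.Int.mod i j != 0))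
  else
    []  -- Python raises ValueError here; excluded by Pre_categorize

-- ===== PORT B =====
-- sieve: boolean table over 0..100, multiples crossed out; indices are in [0,100] so .toNat is exact
def pvSieve : List Int :=
  let tbl := ((List.replicate 101 true).set 0 false).set 1 false
  let tbl := (PySem.List.pyRange 2 11 1).foldl (fun t p =>
    if t.getD p.toNat false then
      (PySem.List.pyRange (p * p) 101 p).foldl (fun t m => t.set m.toNat false) t
    else t) tbl
  (PySem.List.pyRange 2 101 1).filter (fun i => tbl.getD i.toNat false)

def categorize_alt (iterable : List Int) (category : String) : List Int :=
  if category = "Even" then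
    iterable.filter (fun i => PySem.Int.mod i 2 == 0)
  else if category = "Odd" then
    iterable.filter (fun i => PySem.Int.mod i 2 != 0)
  else if category = "Prime" then
    pvSieve
  else
    []  -- Python raises ValueError here; excluded by Pre_categorize

-- ===== PRECONDITION & SPEC =====
-- Pre_ excludes exactly the categories on which A raises ValueError (anything but "Even"/"Odd"/"Prime")
def Pre_categorize (iterable : List Int) (category : String) : Prop :=
  category = "Even" ∨ category = "Odd" ∨ category = "Prime"
instance (iterable : List Int) (category : String) : Decidable (Pre_categorize iterable category) := by
  unfold Pre_categorize; infer_instance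
def pvWitness_categorize : List Int × String := ([1, 2, 3], "Even")

def Spec_categorize (iterable : List Int) (category : String) (out : List Int) : Prop := out = categorize_alt iterable category
instance (iterable : List Int) (category : String) (out : List Int) : Decidable (Spec_categorize iterable category out) := by unfold Spec_categorize; infer_instance

-- ===== CLAIM (what is proved, stated in full; the proofs are below) =====
def Claim_equal_categorize : Prop := ∀ (iterable : List Int) (category : String), Dom_categorize iterable category → Pre_categorize iterable category → Spec_categorize iterable category (categorize iterable category)

-- ===== LEMMAS AND PROOFS =====

-- ===== VERDICT (by name: the statement is the Claim_ definition above) =====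
-- the sieve produces exactly the trial-division list on the fixed range 2..100
theorem pvSieve_eq :
    (PySem.List.pyRange 2 101 1).filter (fun i =>
      (PySem.List.pyRange 2 (pyIsqrt i + 1) 1).all (fun j => PySem.Int.mod i j != 0)) = pvSieve := by
  decide

theorem categorize_spec : Claim_equal_categorize := by
  intro _iterable category _ _
  unfold Spec_categorize categorize categorize_alt
  split_ifs <;> first | exact pvSieve_eq | rfl
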